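-- pv_equiv track=rewrite | github.com/PavelPatsey/Advent_of_Code | 15_Beacon_Exclusion_Zone/15.py | is_beacon
-- ===== SOURCE A (Python) =====
-- def is_cannot_possibly_exist(x, y, sensor_set, beacon_set):
--     if (x, y) in beacon_set or (x, y) in sensor_set:
--         return False
--     else:
--         for (s_x, s_y, d) in sensor_set:
--             d_x_y = abs(s_x - x) + abs(s_y - y)
--             if d_x_y <= d:
--                 return True
--         return False
--
-- def is_beacon(x, y, sensor_set, beacon_set):
--     if (
--         not is_cannot_possibly_exist(x, y, sensor_set, beacon_set)
--         and not (x, y) in sensor_set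
--         and not (x, y) in beacon_set
--     ):
--         is_beacon = True
--         for dx, dy in [(-1, -1), (-1, 1), (1, -1), (1, 1)]:
--             is_beacon = is_beacon and is_cannot_possibly_exist(
--                 x + dx, y + dy, sensor_set, beacon_set
--             )
--         return is_beacon
--     else:
--         return False
-- ===== SOURCE B (Python) =====
-- def is_beacon(x, y, sensor_set, beacon_set):
--     # One pass over the sensors, maintaining a coverage flag for the center
--     # and each of the four diagonal neighbours.  The original's
--     # `(x, y) in sensor_set` tests compare a 2-tuple against 3-tuples and are
--     # always False, so they are dropped.
--     c0 = c1 = c2 = c3 = c4 = False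
--     for (sx, sy, d) in sensor_set:
--         c0 = c0 or abs(sx - x) + abs(sy - y) <= d
--         c1 = c1 or abs(sx - (x - 1)) + abs(sy - (y - 1)) <= d
--         c2 = c2 or abs(sx - (x - 1)) + abs(sy - (y + 1)) <= d
--         c3 = c3 or abs(sx - (x + 1)) + abs(sy - (y - 1)) <= d
--         c4 = c4 or abs(sx - (x + 1)) + abs(sy - (y + 1)) <= d
--     if (x, y) in beacon_set or c0:
--         return False
--     return ((x - 1, y - 1) not in beacon_set and c1
--             and (x - 1, y + 1) not in beacon_set and c2
--             and (x + 1, y - 1) not in beacon_set and c3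
--             and (x + 1, y + 1) not in beacon_set and c4)
-- ===== Notes on version B (the rewrite author's own statement) =====
-- stated objective: alternative
-- what changed: Replaces A's five separate early-return scans of the sensor list (one per point via is_cannot_possibly_exist) with a single fold maintaining five coverage flags, and drops the always-False 2-tuple-in-set-of-3-tuples sensor membership tests.
import Mathlib
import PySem

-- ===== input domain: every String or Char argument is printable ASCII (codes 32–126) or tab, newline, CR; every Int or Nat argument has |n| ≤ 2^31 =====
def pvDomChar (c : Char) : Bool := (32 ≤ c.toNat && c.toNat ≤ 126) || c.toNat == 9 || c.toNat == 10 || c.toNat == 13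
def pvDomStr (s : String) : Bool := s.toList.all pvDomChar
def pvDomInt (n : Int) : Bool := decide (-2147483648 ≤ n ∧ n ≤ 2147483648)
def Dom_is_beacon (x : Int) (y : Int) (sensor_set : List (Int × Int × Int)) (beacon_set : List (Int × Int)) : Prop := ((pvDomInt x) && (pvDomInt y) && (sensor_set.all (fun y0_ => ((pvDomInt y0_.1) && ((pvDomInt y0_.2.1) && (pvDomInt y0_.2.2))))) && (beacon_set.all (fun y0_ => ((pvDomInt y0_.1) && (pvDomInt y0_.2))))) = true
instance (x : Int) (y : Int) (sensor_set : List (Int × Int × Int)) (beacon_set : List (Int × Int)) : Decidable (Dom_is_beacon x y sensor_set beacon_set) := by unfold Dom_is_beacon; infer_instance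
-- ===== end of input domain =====

-- B replaces A's five separate scans of the sensor list by a single pass maintaining
-- five coverage flags (objective: alternative decomposition, same asymptotic cost).

-- ===== PORT A =====
-- Python's `(x, y) in sensor_set` compares a 2-tuple with the set's 3-tuples and is
-- therefore always False; it is ported literally as `false` (exact).
def is_cannot_possibly_exist (x : Int) (y : Int) (sensor_set : List (Int × Int × Int)) (beacon_set : List (Int × Int)) : Bool :=
  if beacon_set.contains (x, y) || false then
    false
  else
    -- `for … in sensor_set: if d_x_y <= d: return True` / `return False`
    sensor_set.any (fun t => decide (|t.1 - x| + |t.2.1 - y| ≤ t.2.2))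

def is_beacon (x : Int) (y : Int) (sensor_set : List (Int × Int × Int)) (beacon_set : List (Int × Int)) : Bool :=
  if !is_cannot_possibly_exist x y sensor_set beacon_set
      && !false  -- the dead `(x, y) in sensor_set` test, always False (see above)
      && !(beacon_set.contains (x, y)) then
    ([((-1 : Int), (-1 : Int)), (-1, 1), (1, -1), (1, 1)]).foldl
      (fun acc d => acc && is_cannot_possibly_exist (x + d.1) (y + d.2) sensor_set beacon_set)
      true
  else
    false

-- ===== PORT B =====
def is_beacon_alt (x : Int) (y : Int) (sensor_set : List (Int × Int × Int)) (beacon_set : List (Int × Int)) : Bool :=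
  let c := sensor_set.foldl
    (fun (c : Bool × Bool × Bool × Bool × Bool) t =>
      (c.1 || decide (|t.1 - x| + |t.2.1 - y| ≤ t.2.2),
       c.2.1 || decide (|t.1 - (x - 1)| + |t.2.1 - (y - 1)| ≤ t.2.2),
       c.2.2.1 || decide (|t.1 - (x - 1)| + |t.2.1 - (y + 1)| ≤ t.2.2),
       c.2.2.2.1 || decide (|t.1 - (x + 1)| + |t.2.1 - (y - 1)| ≤ t.2.2),
       c.2.2.2.2 || decide (|t.1 - (x + 1)| + |t.2.1 - (y + 1)| ≤ t.2.2)))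
    (false, false, false, false, false)
  if beacon_set.contains (x, y) || c.1 then
    false
  else
    !beacon_set.contains (x - 1, y - 1) && c.2.1
      && !beacon_set.contains (x - 1, y + 1) && c.2.2.1
      && !beacon_set.contains (x + 1, y - 1) && c.2.2.2.1
      && !beacon_set.contains (x + 1, y + 1) && c.2.2.2.2

-- ===== PRECONDITION & SPEC =====
def Spec_is_beacon (x : Int) (y : Int) (sensor_set : List (Int × Int × Int)) (beacon_set : List (Int × Int)) (out : Bool) : Prop := out = is_beacon_alt x y sensor_set beacon_set
instance (x : Int) (y : Int) (sensor_set : List (Int × Int × Int)) (beacon_set : List (Int × Int)) (out : Bool) : Decidable (Spec_is_beacon x y sensor_set beacon_set out) := by unfold Spec_is_beacon; infer_instance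

-- ===== CLAIM (what is proved, stated in full; the proofs are below) =====
def Claim_equal_is_beacon : Prop := ∀ (x : Int) (y : Int) (sensor_set : List (Int × Int × Int)) (beacon_set : List (Int × Int)), Dom_is_beacon x y sensor_set beacon_set → Spec_is_beacon x y sensor_set beacon_set (is_beacon x y sensor_set beacon_set)

-- ===== LEMMAS AND PROOFS =====

-- B's single fold computes, componentwise, `any` of the five distance predicates.
theorem foldl_five (x y : Int) (l : List (Int × Int × Int))
    (c0 c1 c2 c3 c4 : Bool) :
    l.foldl
      (fun (c : Bool × Bool × Bool × Bool × Bool) t =>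
        (c.1 || decide (|t.1 - x| + |t.2.1 - y| ≤ t.2.2),
         c.2.1 || decide (|t.1 - (x - 1)| + |t.2.1 - (y - 1)| ≤ t.2.2),
         c.2.2.1 || decide (|t.1 - (x - 1)| + |t.2.1 - (y + 1)| ≤ t.2.2),
         c.2.2.2.1 || decide (|t.1 - (x + 1)| + |t.2.1 - (y - 1)| ≤ t.2.2),
         c.2.2.2.2 || decide (|t.1 - (x + 1)| + |t.2.1 - (y + 1)| ≤ t.2.2)))
      (c0, c1, c2, c3, c4)
    = (c0 || l.any (fun t => decide (|t.1 - x| + |t.2.1 - y| ≤ t.2.2)),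
       c1 || l.any (fun t => decide (|t.1 - (x - 1)| + |t.2.1 - (y - 1)| ≤ t.2.2)),
       c2 || l.any (fun t => decide (|t.1 - (x - 1)| + |t.2.1 - (y + 1)| ≤ t.2.2)),
       c3 || l.any (fun t => decide (|t.1 - (x + 1)| + |t.2.1 - (y - 1)| ≤ t.2.2)),
       c4 || l.any (fun t => decide (|t.1 - (x + 1)| + |t.2.1 - (y + 1)| ≤ t.2.2))) := by
  induction l generalizing c0 c1 c2 c3 c4 with
  | nil => simp
  | cons h tl ih =>
      simp [List.foldl, List.any, ih, Bool.or_assoc]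

-- ===== VERDICT (by name: the statement is the Claim_ definition above) =====
theorem is_beacon_spec : Claim_equal_is_beacon := by
  intro x y s b _
  unfold Spec_is_beacon is_beacon is_beacon_alt is_cannot_possibly_exist
  rw [foldl_five]
  have e1 : x + (-1 : Int) = x - 1 := by ring
  have e2 : y + (-1 : Int) = y - 1 := by ring
  simp only [List.foldl, e1, e2]
  generalize b.contains (x, y) = B0
  generalize b.contains (x - 1, y - 1) = B1
  generalize b.contains (x - 1, y + 1) = B2
  generalize b.contains (x + 1, y - 1) = B3
  generalize b.contains (x + 1, y + 1) = B4
  generalize s.any (fun t => decide (|t.1 - x| + |t.2.1 - y| ≤ t.2.2)) = C0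
  generalize s.any (fun t => decide (|t.1 - (x - 1)| + |t.2.1 - (y - 1)| ≤ t.2.2)) = C1
  generalize s.any (fun t => decide (|t.1 - (x - 1)| + |t.2.1 - (y + 1)| ≤ t.2.2)) = C2
  generalize s.any (fun t => decide (|t.1 - (x + 1)| + |t.2.1 - (y - 1)| ≤ t.2.2)) = C3
  generalize s.any (fun t => decide (|t.1 - (x + 1)| + |t.2.1 - (y + 1)| ≤ t.2.2)) = C4
  cases B0 <;> cases B1 <;> cases B2 <;> cases B3 <;> cases B4 <;>
    cases C0 <;> cases C1 <;> cases C2 <;> cases C3 <;> cases C4 <;> rfl
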